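-- pv_equiv track=rewrite | github.com/ejfn/advent-of-code | 2017/21/day21.py | split_grid
-- ===== SOURCE A (Python) =====
-- def split_grid(grid, size):
--     """Split grid into smaller squares of given size."""
--     n = len(grid)
--     squares = []
--
--     for row in range(n // size):
--         row_squares = []
--         for col in range(n // size):
--             square = tuple(
--                 grid[row * size + i][col * size:col * size + size]
--                 for i in range(size)
--             )
--             row_squares.append(square)
--         squares.append(row_squares)
--
--     return squares
-- ===== SOURCE B (Python) =====
-- def split_grid(grid, size):
--     """Split grid into smaller squares of given size."""
--     num = len(grid) // size
--     squares = []
--     rows = grid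
--     for _ in range(num):
--         band, rows = rows[:size], rows[size:]
--         row_squares = []
--         for _ in range(num):
--             row_squares.append(tuple(s[:size] for s in band))
--             band = [s[size:] for s in band]
--         squares.append(row_squares)
--     return squares
-- ===== Notes on version B (the rewrite author's own statement) =====
-- stated objective: alternative
-- what changed: B replaces A's index arithmetic (grid[row*size+i][col*size:col*size+size] over ranges) by successive slicing: it peels a band of `size` rows off the front of the list, then peels each band's squares left-to-right by mapping s[:size]/s[size:] over the band, with no element indexing at all.
import Mathlib
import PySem

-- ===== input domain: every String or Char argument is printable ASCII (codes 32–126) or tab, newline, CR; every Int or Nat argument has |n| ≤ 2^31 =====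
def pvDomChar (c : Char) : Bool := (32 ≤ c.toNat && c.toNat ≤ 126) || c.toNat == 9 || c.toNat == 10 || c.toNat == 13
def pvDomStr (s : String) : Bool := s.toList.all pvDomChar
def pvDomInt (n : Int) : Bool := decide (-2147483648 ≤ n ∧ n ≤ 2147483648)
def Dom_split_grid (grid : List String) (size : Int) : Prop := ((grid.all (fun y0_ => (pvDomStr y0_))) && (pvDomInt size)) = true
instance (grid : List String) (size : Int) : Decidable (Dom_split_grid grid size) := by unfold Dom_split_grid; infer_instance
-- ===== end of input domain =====

-- B replaces A's index arithmetic by successive slicing (peeling bands of rows and square-wide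
-- prefixes off via take/drop); same asymptotic cost ("alternative"), proved equal for size ≠ 0.


-- ===== PORT A =====
def split_grid (grid : List String) (size : Int) : List (List (List String)) :=
  let n : Int := grid.length
  (PySem.List.pyRange 0 (PySem.Int.floordiv n size) 1).foldl (fun squares row =>
    let row_squares := (PySem.List.pyRange 0 (PySem.Int.floordiv n size) 1).foldl
      (fun row_squares col =>
        let square := (PySem.List.pyRange 0 size 1).map (fun i =>
          PySem.Str.slice ((PySem.List.pyGet? grid (row * size + i)).getD "")
            (some (col * size)) (some (col * size + size)))
        row_squares ++ [square]) []
    squares ++ [row_squares]) []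

-- ===== PORT B =====
def split_grid_alt (grid : List String) (size : Int) : List (List (List String)) :=
  let num := PySem.Int.floordiv (grid.length : Int) size
  let st := (PySem.List.pyRange 0 num 1).foldl
    (fun (st : List (List (List String)) × List String) _ =>
      let band := PySem.List.slice st.2 none (some size)
      let rows := PySem.List.slice st.2 (some size) none
      let inner := (PySem.List.pyRange 0 num 1).foldl
        (fun (p : List (List String) × List String) _ =>
          (p.1 ++ [p.2.map (fun s => PySem.Str.slice s none (some size))],
           p.2.map (fun s => PySem.Str.slice s (some size) none)))
        ([], band)
      (st.1 ++ [inner.1], rows)) ([], grid)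
  st.1

-- ===== PRECONDITION & SPEC =====
-- Pre_ excludes only size = 0, where the Python A (and B) raise ZeroDivisionError on n // size.
def Pre_split_grid (grid : List String) (size : Int) : Prop := size ≠ 0
instance (grid : List String) (size : Int) : Decidable (Pre_split_grid grid size) := by unfold Pre_split_grid; infer_instance
def pvWitness_split_grid : List String × Int := (["#.", ".#"], 1)

def Spec_split_grid (grid : List String) (size : Int) (out : List (List (List String))) : Prop := out = split_grid_alt grid size
instance (grid : List String) (size : Int) (out : List (List (List String))) : Decidable (Spec_split_grid grid size out) := by unfold Spec_split_grid; infer_instance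

-- ===== CLAIM (what is proved, stated in full; the proofs are below) =====
def Claim_equal_split_grid : Prop := ∀ (grid : List String) (size : Int), Dom_split_grid grid size → Pre_split_grid grid size → Spec_split_grid grid size (split_grid grid size)

-- ===== LEMMAS AND PROOFS =====

-- common normal form: the m×m grid of squares, in take/drop style (k = size.toNat, m = n / k)
def pvNF (grid : List String) (k : Nat) : List (List (List String)) :=
  (List.range (grid.length / k)).map (fun r =>
    (List.range (grid.length / k)).map (fun c =>
      ((grid.drop (r * k)).take k).map (fun s =>
        String.ofList ((s.toList.drop (c * k)).take k))))

lemma pyRange_nonpos (m : Int) (h : m ≤ 0) : PySem.List.pyRange 0 m 1 = [] := by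
  simp [PySem.List.pyRange]; omega

-- A = normal form for positive size
lemma A_eq_nf (grid : List String) (k : Nat) (hk : 1 ≤ k) :
    split_grid grid (k : Int) = pvNF grid k := by
  unfold split_grid pvNF
  simp only [PySem.Int.floordiv_natCast, PySem.List.pyRange_zero_natCast, List.foldl_map,
    PySem.List.foldl_append_singleton_eq_map, List.nil_append, List.map_map]
  apply List.map_congr_left
  intro r hr
  apply List.map_congr_left
  intro c hc
  rw [List.mem_range] at hr hc
  have h1 : r * k + k ≤ (grid.length / k) * k :=
    (show (r + 1) * k ≤ _ from Nat.mul_le_mul_right k hr).trans_eq' (by ring)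
  have h2 : (grid.length / k) * k ≤ grid.length := Nat.div_mul_le_self _ _
  apply List.ext_getElem
  · simp
    omega
  · intro j hj1 hj2
    simp only [List.getElem_map, Function.comp_apply, List.getElem_range, List.getElem_take,
      List.getElem_drop]
    have hidx : r * k + j < grid.length := by
      have h1 : r * k + k ≤ (grid.length / k) * k := by
        have : r + 1 ≤ grid.length / k := hr
        calc r * k + k = (r + 1) * k := by ring
          _ ≤ (grid.length / k) * k := Nat.mul_le_mul_right k this
      have h2 : (grid.length / k) * k ≤ grid.length := Nat.div_mul_le_self _ _
      have : j < k := by simpa using hj1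
      omega
    have hget : PySem.List.pyGet? grid ((r : Int) * (k : Int) + (j : Int)) = some grid[r * k + j] := by
      have : ((r * k + j : Nat) : Int) = (r : Int) * (k : Int) + (j : Int) := by push_cast; ring
      rw [← this, PySem.List.pyGet?_natCast, List.getElem?_eq_getElem hidx]
    rw [hget]
    simp only [Option.getD_some, PySem.Str.slice]
    have : ((c : Int) * (k : Int)) = ((c * k : Nat) : Int) := by push_cast; ring
    rw [this, show ((c * k : Nat) : Int) + (k : Int) = ((c * k : Nat) : Int) + ((k : Nat) : Int) from rfl]
    rw [PySem.Chars.slice, PySem.List.slice_natCast_add]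

-- B's inner loop: after i iterations starting on band, the accumulator holds the first i squares
-- of the band and the remaining strings have lost i*k leading characters
lemma B_inner_inv (band : List String) (size : Int) (k : Nat) (hs : size = (k : Int)) (i : Nat)
    (acc : List (List String)) :
    (List.range i).foldl
      (fun (p : List (List String) × List String) (_ : Nat) =>
        (p.1 ++ [p.2.map (fun s => PySem.Str.slice s none (some size))],
         p.2.map (fun s => PySem.Str.slice s (some size) none)))
      (acc, band) =
    (acc ++ (List.range i).map (fun c =>
        band.map (fun s => String.ofList ((s.toList.drop (c * k)).take k))),
     band.map (fun s => String.ofList (s.toList.drop (i * k)))) := by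
  induction i with
  | zero => simp
  | succ i ih =>
    rw [List.range_succ, List.foldl_append, ih]
    simp only [List.foldl_cons, List.foldl_nil]
    refine Prod.ext ?_ ?_
    · simp only [List.map_append, ← List.append_assoc, List.map_map,
        List.map_cons, List.map_nil]
      congr 2
      refine List.map_congr_left fun s _ => ?_
      simp [Function.comp, PySem.Str.slice, PySem.Chars.slice, hs,
        PySem.List.slice_to_natCast]
    · simp only [List.map_map]
      congr 1
      funext s
      simp only [Function.comp, PySem.Str.slice, PySem.Chars.slice, hs,
        PySem.List.slice_from_natCast, String.toList_ofList, List.drop_drop]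
      congr 2
      ring

-- B's outer loop: after j iterations the accumulator holds the first j rows of squares and the
-- remaining row list is grid.drop (j*k)
lemma B_outer_inv (grid : List String) (size : Int) (k m : Nat) (hs : size = (k : Int)) (j : Nat) :
    (List.range j).foldl
      (fun (st : List (List (List String)) × List String) (_ : Nat) =>
        (st.1 ++ [((List.range m).foldl
          (fun (p : List (List String) × List String) (_ : Nat) =>
            (p.1 ++ [p.2.map (fun s => PySem.Str.slice s none (some size))],
             p.2.map (fun s => PySem.Str.slice s (some size) none)))
          ([], PySem.List.slice st.2 none (some size))).1],
         PySem.List.slice st.2 (some size) none)) ([], grid) =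
    ((List.range j).map (fun r => (List.range m).map (fun c =>
        ((grid.drop (r * k)).take k).map (fun s =>
          String.ofList ((s.toList.drop (c * k)).take k)))),
     grid.drop (j * k)) := by
  induction j with
  | zero => simp
  | succ j ih =>
    rw [List.range_succ, List.foldl_append, ih]
    simp only [List.foldl_cons, List.foldl_nil]
    rw [hs, PySem.List.slice_to_natCast, PySem.List.slice_from_natCast,
      B_inner_inv _ ((k : Nat) : Int) k rfl m]
    refine Prod.ext ?_ ?_
    · simp
    · simp only [List.drop_drop]
      congr 1
      ring

-- B = normal form for positive size
lemma B_eq_nf (grid : List String) (k : Nat) :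
    split_grid_alt grid (k : Int) = pvNF grid k := by
  unfold split_grid_alt pvNF
  simp only [PySem.Int.floordiv_natCast, PySem.List.pyRange_zero_natCast, List.foldl_map]
  rw [B_outer_inv grid (k : Int) k (grid.length / k) rfl (grid.length / k)]

-- ===== VERDICT (by name: the statement is the Claim_ definition above) =====
theorem split_grid_spec : Claim_equal_split_grid := by
  intro grid size _ hpre
  unfold Spec_split_grid
  rcases lt_trichotomy size 0 with hneg | hzero | hpos
  · -- negative size: n // size ≤ 0, both loops are empty, both return []
    have hle : PySem.Int.floordiv (grid.length : Int) size ≤ 0 := by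
      unfold PySem.Int.floordiv
      have h1 : (grid.length : Int) / size ≤ 0 :=
        Int.ediv_nonpos_of_nonneg_of_nonpos (Int.natCast_nonneg _) (le_of_lt hneg)
      rw [Int.fdiv_eq_ediv]; split_ifs <;> omega
    simp only [split_grid, split_grid_alt, pyRange_nonpos _ hle, List.foldl_nil]
  · exact absurd hzero hpre
  · -- positive size
    obtain ⟨k, rfl⟩ : ∃ k : Nat, size = (k : Int) :=
      ⟨size.toNat, (Int.toNat_of_nonneg (le_of_lt hpos)).symm⟩
    have hk : 1 ≤ k := by exact_mod_cast hpos
    rw [A_eq_nf grid k hk, B_eq_nf grid k]
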